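-- pv_equiv track=rewrite | github.com/WHEATL3Y/aoc24 | day5/python/day5.py | fix_invalid
-- ===== SOURCE A (Python) =====
-- def fix_invalid(update, rules):
--     new_update = list(update)
--     for rule in rules:
--         if is_valid(update, [rule]):
--             continue
--         else:
--             tmp0 = update[update.index(rule[1])]
--             tmp1 = update[update.index(rule[0])]
--             new_update[update.index(rule[0])] = tmp0
--             new_update[update.index(rule[1])] = tmp1
--             return fix_invalid(tuple(new_update), rules)
--
--     return tuple(new_update)
--
-- def is_valid(update, rules):
--     for rule in rules:
--         if ((rule[0] not in update or rule[1] not in update)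
--            or rule[1] in update[update.index(rule[0]):]):
--             continue
--         else:
--             return False
--
--     return True
-- ===== SOURCE B (Python) =====
-- def fix_invalid(update, rules):
--     # Iterative fixpoint with per-pass first/last occurrence maps (one O(n) pass
--     # replaces A's repeated 'in'/.index/slice scans and recursion with copies).
--     lst = list(update)
--     while True:
--         first = {}
--         last = {}
--         for i, v in enumerate(lst):
--             if v not in first:
--                 first[v] = i
--             last[v] = i
--         swapped = False
--         for rule in rules:
--             if rule[0] not in first:
--                 continue
--             if rule[1] not in first:
--                 continue
--             i0 = first[rule[0]]
--             if last[rule[1]] >= i0: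
--                 continue
--             i1 = first[rule[1]]
--             lst[i0], lst[i1] = lst[i1], lst[i0]
--             swapped = True
--             break
--         if not swapped:
--             return tuple(lst)
-- ===== Notes on version B (the rewrite author's own statement) =====
-- stated objective: faster
-- what changed: A restarts a recursion that, per step, rescans the list with 'in'/.index/slicing for every rule and copies the list; B is an iterative in-place fixpoint that builds first/last-occurrence dictionaries in one pass per round, so each rule is checked in O(1) and each round costs O(n + R) instead of A's O(R*n) plus recursion and copying.
-- outside the precondition, e.g. on fix_invalid([1, 2, 1], [[1, 2], [2, 1]]): A returns (1, 2, 1), B returns (1, 2, 1)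
import Mathlib
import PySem

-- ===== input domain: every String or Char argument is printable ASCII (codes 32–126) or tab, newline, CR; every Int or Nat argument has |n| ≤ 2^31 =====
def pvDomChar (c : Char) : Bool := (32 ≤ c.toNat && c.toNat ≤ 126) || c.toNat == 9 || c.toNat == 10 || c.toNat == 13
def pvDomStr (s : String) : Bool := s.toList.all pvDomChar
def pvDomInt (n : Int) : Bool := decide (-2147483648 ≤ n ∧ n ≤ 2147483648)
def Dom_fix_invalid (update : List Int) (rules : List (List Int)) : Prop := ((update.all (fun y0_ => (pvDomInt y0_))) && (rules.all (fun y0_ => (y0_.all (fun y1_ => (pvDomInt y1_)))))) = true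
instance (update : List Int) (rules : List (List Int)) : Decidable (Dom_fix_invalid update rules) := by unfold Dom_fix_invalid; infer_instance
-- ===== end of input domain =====

-- B replaces A's restarting recursion (which rescans with `in`/.index/slicing per rule and
-- copies the list at every step) by an in-place iterative fixpoint that builds first/last
-- occurrence maps in one pass per round; same return value on every input admitted by Pre_.


-- ===== PORT A =====
-- is_valid(update, rules); `rule[0]`/`rule[1]` raise IndexError on too-short rules in Python:
-- those inputs are excluded by Pre_ (the `none` branches below are unreachable there).
def is_valid (u : List Int) : List (List Int) → Bool
  | [] => true
  | rule :: rest =>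
    let cont : Bool :=
      match PySem.List.pyGet? rule 0 with
      | none => true  -- Python raises IndexError here (outside Pre_)
      | some r0 =>
        if !(u.contains r0) then true
        else
          match PySem.List.pyGet? rule 1 with
          | none => true  -- Python raises IndexError here (outside Pre_)
          | some r1 =>
            if !(u.contains r1) then true
            else (PySem.List.slice u (some (((PySem.List.index? u r0).getD 0 : Nat) : Int)) none).contains r1
    if cont then is_valid u rest else false

-- the body of A's `for rule in rules:` loop: first invalid rule yields the swapped list
def fixScanA (u : List Int) : List (List Int) → Option (List Int)
  | [] => none
  | rule :: rest =>
    if is_valid u [rule] then fixScanA u rest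
    else
      let r0 := (PySem.List.pyGet? rule 0).getD 0
      let r1 := (PySem.List.pyGet? rule 1).getD 0
      let i1 : Int := ((PySem.List.index? u r1).getD 0 : Nat)
      let i0 : Int := ((PySem.List.index? u r0).getD 0 : Nat)
      let tmp0 := PySem.List.pyGetD u i1 0
      let tmp1 := PySem.List.pyGetD u i0 0
      some (PySem.List.pySetD (PySem.List.pySetD u i0 tmp0) i1 tmp1)

-- A's unbounded self-recursion, totalized by fuel; inside Pre_ (acyclic rules) the process
-- stops after at most len(update)^2 swaps, so the fuel is never exhausted there.
def fixAuxA : Nat → List Int → List (List Int) → List Int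
  | 0, u, _ => u
  | Nat.succ fuel, u, rules =>
    match fixScanA u rules with
    | none => u
    | some nu => fixAuxA fuel nu rules

def fix_invalid (update : List Int) (rules : List (List Int)) : List Int :=
  fixAuxA (update.length * update.length + 1) update rules

-- ===== PORT B =====
-- one enumerate pass: first- and last-occurrence index of every value
def flStep (fl : PySem.Dict Int Int × PySem.Dict Int Int) (iv : Int × Int) :
    PySem.Dict Int Int × PySem.Dict Int Int :=
  let f := if fl.1.contains iv.2 then fl.1 else fl.1.insert iv.2 iv.1
  (f, fl.2.insert iv.2 iv.1)

def buildFL (lst : List Int) : PySem.Dict Int Int × PySem.Dict Int Int :=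
  (PySem.List.enumerate lst 0).foldl flStep (PySem.Dict.empty, PySem.Dict.empty)

-- the body of B's `for rule in rules:` loop: the pair of positions to swap, if any
def scanB (first lastd : PySem.Dict Int Int) : List (List Int) → Option (Int × Int)
  | [] => none
  | rule :: rest =>
    match PySem.List.pyGet? rule 0 with
    | none => scanB first lastd rest  -- Python raises IndexError here (outside Pre_)
    | some r0 =>
      if !(first.contains r0) then scanB first lastd rest
      else
        match PySem.List.pyGet? rule 1 with
        | none => scanB first lastd rest  -- Python raises IndexError here (outside Pre_)
        | some r1 =>
          if !(first.contains r1) then scanB first lastd rest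
          else
            let i0 := first.getD r0 0
            if lastd.getD r1 0 ≥ i0 then scanB first lastd rest
            else some (i0, first.getD r1 0)

-- B's `while True:` loop, totalized by the same fuel as A's recursion
def fixLoopB : Nat → List Int → List (List Int) → List Int
  | 0, lst, _ => lst
  | Nat.succ fuel, lst, rules =>
    let fl := buildFL lst
    match scanB fl.1 fl.2 rules with
    | none => lst
    | some p =>
      fixLoopB fuel
        (PySem.List.pySetD (PySem.List.pySetD lst p.1 (PySem.List.pyGetD lst p.2 0)) p.2
          (PySem.List.pyGetD lst p.1 0)) rules

def fix_invalid_alt (update : List Int) (rules : List (List Int)) : List Int :=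
  fixLoopB (update.length * update.length + 1) update rules

-- ===== PRECONDITION & SPEC =====
-- the ordering edges induced by the rules on the values present in `update`
def pvEdges (update : List Int) (rules : List (List Int)) : List (Int × Int) :=
  rules.filterMap (fun r =>
    match r with
    | a :: b :: _ => if a ∈ update ∧ b ∈ update ∧ a ≠ b then some (a, b) else none
    | _ => none)

def pvCompose (es cl : List (Int × Int)) : List (Int × Int) :=
  cl.flatMap (fun p => es.filterMap (fun q => if p.2 = q.1 then some (p.1, q.2) else none))

def pvClosure (es : List (Int × Int)) : Nat → List (Int × Int)
  | 0 => es
  | Nat.succ k => PySem.List.dedup (pvClosure es k ++ pvCompose es (pvClosure es k))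

-- Pre_ excludes exactly the inputs where Python A raises: an IndexError on a rule that is
-- empty (or a single-element rule whose head occurs in update), and a RecursionError when the
-- rule relation has a cycle among update's values, on which A's swap process never reaches a
-- valid state (on duplicate-containing updates a cyclic instance can still return; B agrees
-- with A there, see the cite).
def Pre_fix_invalid (update : List Int) (rules : List (List Int)) : Prop :=
  (∀ rule ∈ rules, rule ≠ [] ∧ (rule.headD 0 ∈ update → 2 ≤ rule.length)) ∧
  (∀ p ∈ pvClosure (pvEdges update rules) update.length, p.1 ≠ p.2)
instance (update : List Int) (rules : List (List Int)) : Decidable (Pre_fix_invalid update rules) := by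
  unfold Pre_fix_invalid; infer_instance

def pvWitness_fix_invalid : List Int × List (List Int) := ([1, 2, 3], [[2, 1], [3, 2], [3, 1]])

def Spec_fix_invalid (update : List Int) (rules : List (List Int)) (out : List Int) : Prop := out = fix_invalid_alt update rules
instance (update : List Int) (rules : List (List Int)) (out : List Int) : Decidable (Spec_fix_invalid update rules out) := by unfold Spec_fix_invalid; infer_instance

-- ===== CLAIM (what is proved, stated in full; the proofs are below) =====
def Claim_equal_fix_invalid : Prop := ∀ (update : List Int) (rules : List (List Int)), Dom_fix_invalid update rules → Pre_fix_invalid update rules → Spec_fix_invalid update rules (fix_invalid update rules)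

-- ===== LEMMAS AND PROOFS =====
-- (the two ports are in fact equal on every input; Pre_ is only needed for fidelity to Python)

def swapFun (u : List Int) (p : Int × Int) : List Int :=
  PySem.List.pySetD (PySem.List.pySetD u p.1 (PySem.List.pyGetD u p.2 0)) p.2
    (PySem.List.pyGetD u p.1 0)

lemma buildFL_append (xs : List Int) (x : Int) :
    buildFL (xs ++ [x]) = flStep (buildFL xs) ((xs.length : Int), x) := by
  simp [buildFL, PySem.List.enumerate_append, PySem.List.enumerate_cons, PySem.List.enumerate_nil,
    List.foldl_append]

lemma buildFL_fst_get? (lst : List Int) :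
    ∀ v : Int, ((buildFL lst).1).get? v = (PySem.List.index? lst v).map (fun n => (n : Int)) := by
  induction lst using List.reverseRecOn with
  | nil =>
    intro v
    simp [buildFL, PySem.List.enumerate_nil, PySem.Dict.get?_empty, PySem.List.index?]
  | append_singleton xs x ih =>
    intro v
    rw [buildFL_append]
    have hnone : ((buildFL xs).1).get? x = none ↔ x ∉ xs := by
      rw [ih x]
      cases hidx : PySem.List.index? xs x with
      | none => simp [(PySem.List.index?_eq_none_iff xs x).1 hidx]
      | some n =>
        have hx : x ∈ xs := (PySem.List.index?_isSome_iff xs x).1 (by rw [hidx]; rfl)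
        simp [hx]
    by_cases hx : x ∈ xs
    · have hct : ((buildFL xs).1).contains x = true := by
        by_contra hc
        have hc' : ((buildFL xs).1).contains x = false := by
          cases h : ((buildFL xs).1).contains x
          · rfl
          · exact absurd h hc
        exact (hnone.1 ((PySem.Dict.get?_eq_none_iff_contains _ _).2 hc')) hx
      simp only [flStep, hct, if_true]
      by_cases hvx : v ∈ xs
      · rw [ih v, PySem.List.index?_append_of_mem [x] hvx]
      · have hvnx : v ≠ x := fun h => hvx (h ▸ hx)
        rw [ih v]
        rw [(PySem.List.index?_eq_none_iff xs v).2 hvx,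
          (PySem.List.index?_eq_none_iff (xs ++ [x]) v).2 (by simp [hvx, hvnx])]
    · have hcf : ((buildFL xs).1).contains x = false := by
        exact (PySem.Dict.get?_eq_none_iff_contains _ _).1 (hnone.2 hx)
      simp only [flStep, hcf, Bool.false_eq_true, if_false]
      by_cases hvx : v = x
      · subst hvx
        rw [PySem.Dict.get?_insert_self, PySem.List.index?_append_singleton_self xs v hx]
        rfl
      · rw [PySem.Dict.get?_insert_of_ne _ _ hvx, ih v]
        by_cases hvm : v ∈ xs
        · rw [PySem.List.index?_append_of_mem [x] hvm]
        · rw [(PySem.List.index?_eq_none_iff xs v).2 hvm,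
            (PySem.List.index?_eq_none_iff (xs ++ [x]) v).2 (by simp [hvm, hvx])]

lemma buildFL_fst_contains (lst : List Int) (v : Int) :
    ((buildFL lst).1).contains v = lst.contains v := by
  cases hidx : PySem.List.index? lst v with
  | none =>
    have hm : v ∉ lst := (PySem.List.index?_eq_none_iff lst v).1 hidx
    have hg : ((buildFL lst).1).get? v = none := by rw [buildFL_fst_get? lst v, hidx]; rfl
    rw [(PySem.Dict.get?_eq_none_iff_contains _ _).1 hg]
    simp [hm]
  | some n =>
    have hm : v ∈ lst := (PySem.List.index?_isSome_iff lst v).1 (by rw [hidx]; rfl)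
    have hg : ((buildFL lst).1).get? v = some (n : Int) := by rw [buildFL_fst_get? lst v, hidx]; rfl
    have hc : ((buildFL lst).1).contains v = true := by
      cases hcc : ((buildFL lst).1).contains v
      · rw [(PySem.Dict.get?_eq_none_iff_contains _ _).2 hcc] at hg
        cases hg
      · rfl
    rw [hc]
    simp [hm]

lemma buildFL_snd_none (lst : List Int) :
    ∀ v : Int, ((buildFL lst).2).get? v = none ↔ v ∉ lst := by
  induction lst using List.reverseRecOn with
  | nil =>
    intro v
    simp [buildFL, PySem.List.enumerate_nil, PySem.Dict.get?_empty]
  | append_singleton xs x ih =>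
    intro v
    rw [buildFL_append]
    by_cases hvx : v = x
    · subst hvx
      simp [flStep, PySem.Dict.get?_insert_self]
    · simp only [flStep]
      rw [PySem.Dict.get?_insert_of_ne _ _ hvx, ih v]
      simp [hvx]

lemma buildFL_snd_some (lst : List Int) :
    ∀ (v j : Int), ((buildFL lst).2).get? v = some j →
    ∃ n : Nat, j = (n : Int) ∧ ∃ h : n < lst.length,
      lst[n] = v ∧ ∀ m, n < m → (hm : m < lst.length) → lst[m] ≠ v := by
  induction lst using List.reverseRecOn with
  | nil =>
    intro v j h
    simp [buildFL, PySem.List.enumerate_nil, PySem.Dict.get?_empty] at h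
  | append_singleton xs x ih =>
    intro v j h
    rw [buildFL_append] at h
    by_cases hvx : v = x
    · subst hvx
      rw [show (flStep (buildFL xs) ((xs.length : Int), v)).2 = (buildFL xs).2.insert v (xs.length : Int) from rfl,
        PySem.Dict.get?_insert_self] at h
      refine ⟨xs.length, by exact_mod_cast (Option.some.inj h).symm, by simp, ?_, ?_⟩
      · simp
      · intro m hm hm2 _
        simp at hm2
        omega
    · rw [show (flStep (buildFL xs) ((xs.length : Int), x)).2 = (buildFL xs).2.insert x (xs.length : Int) from rfl,
        PySem.Dict.get?_insert_of_ne _ _ hvx] at h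
      obtain ⟨n, hj, hn, hval, hmax⟩ := ih v j h
      refine ⟨n, hj, by simp; omega, ?_, ?_⟩
      · rw [List.getElem_append_left hn]
        exact hval
      · intro m hm hm2
        by_cases hmlt : m < xs.length
        · rw [List.getElem_append_left hmlt]
          exact hmax m hm hmlt
        · have hmx : m = xs.length := by
            have hl2 : (xs ++ [x]).length = xs.length + 1 := by simp
            omega
          subst hmx
          simp only [List.getElem_concat_length]
          exact fun hh => hvx hh.symm

lemma mem_drop_iff_lastD (lst : List Int) (v : Int) (hv : v ∈ lst) (k : Nat) :
    v ∈ lst.drop k ↔ (k : Int) ≤ ((buildFL lst).2).getD v 0 := by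
  have hne : ((buildFL lst).2).get? v ≠ none := fun h => ((buildFL_snd_none lst v).1 h) hv
  obtain ⟨j, hj⟩ := Option.ne_none_iff_exists'.1 hne
  obtain ⟨n, hjn, hn, hval, hmax⟩ := buildFL_snd_some lst v j hj
  rw [PySem.Dict.getD_of_get?_eq_some _ _ hj, hjn]
  constructor
  · intro hmem
    obtain ⟨i, hi, hiv⟩ := List.mem_iff_getElem.1 hmem
    rw [List.getElem_drop] at hiv
    have hki : k + i < lst.length := by
      have := List.length_drop (l := lst) (i := k)
      omega
    have hle : k + i ≤ n := by
      by_contra hgt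
      exact hmax (k + i) (by omega) hki hiv
    exact_mod_cast Int.ofNat_le.2 (by omega)
  · intro hle
    have hkn : k ≤ n := by exact_mod_cast hle
    apply List.mem_iff_getElem.2
    refine ⟨n - k, by rw [List.length_drop]; omega, ?_⟩
    rw [List.getElem_drop]
    have h2 : lst[k + (n - k)]'(by omega) = lst[n]'hn := by
      congr 1
      omega
    exact h2.trans hval

lemma buildFL_fst_getD (u : List Int) (v : Int) (hv : v ∈ u) :
    ((buildFL u).1).getD v 0 = (((PySem.List.index? u v).getD 0 : Nat) : Int) := by
  obtain ⟨n, hn⟩ := Option.isSome_iff_exists.1 ((PySem.List.index?_isSome_iff u v).2 hv)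
  have hg : ((buildFL u).1).get? v = some (n : Int) := by rw [buildFL_fst_get? u v, hn]; rfl
  rw [PySem.Dict.getD_of_get?_eq_some _ _ hg, hn]
  rfl

lemma scan_eq (u : List Int) (rules : List (List Int)) :
    fixScanA u rules = (scanB (buildFL u).1 (buildFL u).2 rules).map (swapFun u) := by
  induction rules with
  | nil => rfl
  | cons rule rest ih =>
    simp only [fixScanA, scanB, is_valid]
    simp only [buildFL_fst_contains]
    cases h0 : PySem.List.pyGet? rule 0 with
    | none => simpa using ih
    | some r0 =>
      cases hc0 : u.contains r0 with
      | false =>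
        have hn0 : r0 ∉ u := by simpa using hc0
        simpa [hn0] using ih
      | true =>
        have hr0 : r0 ∈ u := by simpa using hc0
        cases h1 : PySem.List.pyGet? rule 1 with
        | none => simpa [hr0] using ih
        | some r1 =>
          cases hc1 : u.contains r1 with
          | false =>
            have hn1 : r1 ∉ u := by simpa using hc1
            simpa [hr0, hn1] using ih
          | true =>
            have hr1 : r1 ∈ u := by simpa using hc1
            have hcnd := mem_drop_iff_lastD u r1 hr1 ((PySem.List.index? u r0).getD 0)
            have hgD0 := buildFL_fst_getD u r0 hr0
            have hgD1 := buildFL_fst_getD u r1 hr1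
            simp only [PySem.List.index?_eq_idxOf?] at hcnd hgD0 hgD1
            by_cases hcond : ((((List.idxOf? r0 u).getD 0 : Nat)) : Int) ≤ ((buildFL u).2).getD r1 0
            · have hmem := hcnd.2 hcond
              simpa [hr0, hr1, hmem, hgD0, hcond, ge_iff_le] using ih
            · have hnm : r1 ∉ List.drop ((List.idxOf? r0 u).getD 0) u := fun hm => hcond (hcnd.1 hm)
              simp [hr0, hr1, hnm, hgD0, hgD1, hcond, ge_iff_le, swapFun]

lemma fixAux_eq (fuel : Nat) (u : List Int) (rules : List (List Int)) :
    fixAuxA fuel u rules = fixLoopB fuel u rules := by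
  induction fuel generalizing u with
  | zero => rfl
  | succ fuel ih =>
    simp only [fixAuxA, fixLoopB, scan_eq u rules]
    cases hb : scanB (buildFL u).1 (buildFL u).2 rules with
    | none => rfl
    | some p =>
      simp only [Option.map_some]
      exact ih _

-- ===== VERDICT (by name: the statement is the Claim_ definition above) =====
theorem fix_invalid_spec : Claim_equal_fix_invalid := by
  intro update rules _ _
  unfold Spec_fix_invalid fix_invalid fix_invalid_alt
  exact fixAux_eq _ update rules
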